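-- pv_equiv track=rewrite | github.com/user-kartik/Python-works | Maximum Number of Achievable Transfer Requests.py | maximumRequests
-- ===== SOURCE A (Python) =====
-- def maximumRequests(n, requests):
--     max_requests = 0
--
--     for mask in range(1 << len(requests)):
--         count = [0] * n
--
--         for i, (fromi, toi) in enumerate(requests):
--             if (mask >> i) & 1:
--                 count[fromi] -= 1
--                 count[toi] += 1
--
--         if all(x == 0 for x in count):
--             max_requests = max(max_requests, bin(mask).count('1'))
--
--     return max_requests
-- ===== SOURCE B (Python) =====
-- def maximumRequests(n, requests):
--     # Backtracking DFS over the requests (take/skip each request) with one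
--     # incrementally updated balance array, instead of enumerating all bitmasks
--     # and rebuilding the count array from scratch for each mask.
--     count = [0] * n
--     m = len(requests)
--
--     def dfs(i, taken):
--         if i == m:
--             return taken if all(x == 0 for x in count) else -1
--         best = dfs(i + 1, taken)
--         a, b = requests[i]
--         count[a] -= 1
--         count[b] += 1
--         best = max(best, dfs(i + 1, taken + 1))
--         count[a] += 1
--         count[b] -= 1
--         return best
--
--     return dfs(0, 0)
-- ===== Notes on version B (the rewrite author's own statement) =====
-- stated objective: alternative
-- what changed: Replaced the enumerate-all-bitmasks loop (which rebuilds and rechecks an n-array for every one of the 2^m masks) by a take/skip backtracking DFS over the requests that updates a single balance array incrementally (same exponential cost; measured ~3.8x constant-factor gain, both time out on the largest inputs).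
import Mathlib
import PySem

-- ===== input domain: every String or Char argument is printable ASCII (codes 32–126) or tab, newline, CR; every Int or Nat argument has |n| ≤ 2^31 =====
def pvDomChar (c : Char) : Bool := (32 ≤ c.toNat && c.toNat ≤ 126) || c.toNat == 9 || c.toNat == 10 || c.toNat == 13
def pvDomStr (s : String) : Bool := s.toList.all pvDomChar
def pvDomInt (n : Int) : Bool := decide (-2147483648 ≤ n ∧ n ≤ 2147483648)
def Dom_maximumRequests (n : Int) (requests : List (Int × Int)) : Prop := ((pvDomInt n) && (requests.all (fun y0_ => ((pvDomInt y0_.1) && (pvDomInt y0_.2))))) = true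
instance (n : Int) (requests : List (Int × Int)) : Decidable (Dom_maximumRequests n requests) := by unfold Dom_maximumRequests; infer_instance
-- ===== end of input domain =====

-- B replaces A's enumerate-all-bitmasks loop by a take/skip backtracking DFS over
-- the requests with one incrementally updated balance list (same results, same
-- exponential cost).

-- ===== PORT A =====

-- count[i] += delta with Python's (possibly negative) index semantics; exact under Pre_ (indices in range)
def pvUpd (c : List Int) (i : Int) (delta : Int) : List Int :=
  PySem.List.pySetD c i (PySem.List.pyGetD c i 0 + delta)

-- bin(mask).count('1') for a nonnegative mask
def pvPopcount : Nat → Nat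
  | 0 => 0
  | (n+1) => (n+1) % 2 + pvPopcount ((n+1)/2)
decreasing_by exact Nat.div_lt_self (Nat.succ_pos n) (by omega)

-- the inner 'for i, (fromi, toi) in enumerate(requests)' loop of A
def pvCountA : List Int → List (Int × Int) → Nat → Nat → List Int
  | count, [], _, _ => count
  | count, (a, b) :: rest, mask, i =>
      pvCountA (if (mask >>> i) &&& 1 = 1 then pvUpd (pvUpd count a (-1)) b 1 else count) rest mask (i+1)

def maximumRequests (n : Int) (requests : List (Int × Int)) : Int :=
  (List.range (2 ^ requests.length)).foldl
    (fun acc mask =>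
      let count := pvCountA (List.replicate n.toNat 0) requests mask 0
      if count.all (fun x => x == 0) then max acc ((pvPopcount mask : Int)) else acc)
    0

-- ===== PORT B =====

-- dfs(i, taken) of Source B: recursion over the remaining requests, the mutable
-- count list becomes a parameter (backtracking = reusing the old list)
def pvDfsB : List Int → List (Int × Int) → Int → Int
  | count, [], taken => if count.all (fun x => x == 0) then taken else -1
  | count, (a, b) :: rest, taken =>
      let best := pvDfsB count rest taken
      max best (pvDfsB (pvUpd (pvUpd count a (-1)) b 1) rest (taken + 1))

def maximumRequests_alt (n : Int) (requests : List (Int × Int)) : Int :=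
  pvDfsB (List.replicate n.toNat 0) requests 0

-- ===== PRECONDITION & SPEC =====
-- Pre_: every building index of a request is a valid Python index into the count
-- list of length n (|index| in range); outside this both Pythons raise IndexError.
def Pre_maximumRequests (n : Int) (requests : List (Int × Int)) : Prop :=
  ∀ p ∈ requests, (-n ≤ p.1 ∧ p.1 < n) ∧ (-n ≤ p.2 ∧ p.2 < n)
instance (n : Int) (requests : List (Int × Int)) : Decidable (Pre_maximumRequests n requests) := by unfold Pre_maximumRequests; infer_instance

def pvWitness_maximumRequests : Int × (List (Int × Int)) := (3, [(0, 1), (1, 0), (-1, 2)])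

def Spec_maximumRequests (n : Int) (requests : List (Int × Int)) (out : Int) : Prop := out = maximumRequests_alt n requests
instance (n : Int) (requests : List (Int × Int)) (out : Int) : Decidable (Spec_maximumRequests n requests out) := by unfold Spec_maximumRequests; infer_instance

-- ===== CLAIM (what is proved, stated in full; the proofs are below) =====
def Claim_equal_maximumRequests : Prop := ∀ (n : Int) (requests : List (Int × Int)), Dom_maximumRequests n requests → Pre_maximumRequests n requests → Spec_maximumRequests n requests (maximumRequests n requests)

-- ===== LEMMAS AND PROOFS =====

-- bit-consuming reformulation of A's inner loop (recursion on the request list)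
def pvApply : List Int → List (Int × Int) → Nat → List Int
  | count, [], _ => count
  | count, (a, b) :: rest, mask =>
      pvApply (if mask &&& 1 = 1 then pvUpd (pvUpd count a (-1)) b 1 else count) rest (mask >>> 1)

-- the value a single mask contributes: taken + popcount if balanced, else -1
def pvG (count : List Int) (reqs : List (Int × Int)) (taken : Int) (mask : Nat) : Int :=
  if (pvApply count reqs mask).all (fun x => x == 0) then taken + (pvPopcount mask : Int) else -1

-- running maximum of g over a list of masks
def pvBestOf (g : Nat → Int) (init : Int) (l : List Nat) : Int :=
  l.foldl (fun a m => max a (g m)) init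

theorem pvCountA_eq (reqs : List (Int × Int)) : ∀ (count : List Int) (mask i : Nat),
    pvCountA count reqs mask i = pvApply count reqs (mask >>> i) := by
  induction reqs with
  | nil => intro count mask i; rfl
  | cons hd tl ih =>
      intro count mask i
      obtain ⟨a, b⟩ := hd
      simp only [pvCountA, pvApply, ih, Nat.shiftRight_add]

theorem pvPopcount_pos (m : Nat) (h : 0 < m) : pvPopcount m = m % 2 + pvPopcount (m / 2) := by
  cases m with
  | zero => omega
  | succ k => simp [pvPopcount]

theorem pvPopcount_even (q : Nat) : pvPopcount (2 * q) = pvPopcount q := by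
  cases q with
  | zero => rfl
  | succ k =>
      rw [pvPopcount_pos (2 * (k+1)) (by omega)]
      have h1 : 2 * (k+1) % 2 = 0 := by omega
      have h2 : 2 * (k+1) / 2 = k + 1 := by omega
      rw [h1, h2]; omega

theorem pvPopcount_odd (q : Nat) : pvPopcount (2 * q + 1) = pvPopcount q + 1 := by
  rw [pvPopcount_pos (2 * q + 1) (by omega)]
  have h1 : (2 * q + 1) % 2 = 1 := by omega
  have h2 : (2 * q + 1) / 2 = q := by omega
  rw [h1, h2]; omega

theorem pvApply_zero (reqs : List (Int × Int)) (count : List Int) : pvApply count reqs 0 = count := by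
  induction reqs generalizing count with
  | nil => rfl
  | cons hd tl ih => obtain ⟨a, b⟩ := hd; simp [pvApply, ih]

theorem pvBestOf_max_init (g : Nat → Int) : ∀ (l : List Nat) (i j : Int),
    pvBestOf g (max i j) l = max i (pvBestOf g j l) := by
  intro l
  induction l with
  | nil => intro i j; rfl
  | cons x xs ih =>
      intro i j
      simp only [pvBestOf, List.foldl_cons] at *
      rw [max_assoc, ih]

theorem pvBestOf_init_le (g : Nat → Int) : ∀ (l : List Nat) (i : Int), i ≤ pvBestOf g i l := by
  intro l
  induction l with
  | nil => intro i; exact le_refl i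
  | cons x xs ih =>
      intro i
      simp only [pvBestOf, List.foldl_cons] at *
      exact le_trans (le_max_left i (g x)) (ih _)

theorem pvBestOf_le_of_mem (g : Nat → Int) : ∀ (l : List Nat) (i : Int) (x : Nat), x ∈ l → g x ≤ pvBestOf g i l := by
  intro l
  induction l with
  | nil => intro i x hx; simp at hx
  | cons y ys ih =>
      intro i x hx
      rcases List.mem_cons.mp hx with h | h
      · subst h
        simp only [pvBestOf, List.foldl_cons]
        exact le_trans (le_max_right i (g x)) (pvBestOf_init_le g ys _)
      · exact ih _ x h

theorem pvBestOf_congr (g g' : Nat → Int) : ∀ (l : List Nat) (i : Int), (∀ x ∈ l, g x = g' x) →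
    pvBestOf g i l = pvBestOf g' i l := by
  intro l
  induction l with
  | nil => intro i h; rfl
  | cons x xs ih =>
      intro i h
      simp only [pvBestOf, List.foldl_cons] at *
      rw [h x (by simp), ih _ (fun y hy => h y (by simp [hy]))]

theorem pvBestOf_perm (g : Nat → Int) {l l' : List Nat} (p : l.Perm l') : ∀ i, pvBestOf g i l = pvBestOf g i l' := by
  induction p with
  | nil => intro i; rfl
  | cons x _ ih => intro i; simp only [pvBestOf, List.foldl_cons] at *; exact ih _
  | swap x y l =>
      intro i
      simp only [pvBestOf, List.foldl_cons]
      rw [max_right_comm]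
  | trans _ _ ih1 ih2 => intro i; rw [ih1, ih2]

theorem pvBestOf_append (g : Nat → Int) (l1 l2 : List Nat) (i : Int) :
    pvBestOf g i (l1 ++ l2) = pvBestOf g (pvBestOf g i l1) l2 := by
  simp [pvBestOf, List.foldl_append]

theorem pvBestOf_map (g : Nat → Int) (f : Nat → Nat) (l : List Nat) (i : Int) :
    pvBestOf g i (l.map f) = pvBestOf (fun q => g (f q)) i l := by
  simp [pvBestOf, List.foldl_map]

theorem pvRangeTwoMulPerm (k : Nat) :
    (List.range (2 * k)).Perm ((List.range k).map (fun q => 2 * q) ++ (List.range k).map (fun q => 2 * q + 1)) := by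
  have h1 : ((List.range k).map (fun q => 2 * q)).Nodup :=
    (List.nodup_range).map (fun a b h => by omega)
  have h2 : ((List.range k).map (fun q => 2 * q + 1)).Nodup :=
    (List.nodup_range).map (fun a b h => by omega)
  have hd : ∀ x ∈ (List.range k).map (fun q => 2 * q), x ∉ (List.range k).map (fun q => 2 * q + 1) := by
    intro x hx hx'
    rcases List.mem_map.mp hx with ⟨q, _, hq⟩
    rcases List.mem_map.mp hx' with ⟨r, _, hr⟩
    omega
  refine (List.perm_ext_iff_of_nodup List.nodup_range (List.Nodup.append h1 h2 (List.disjoint_left.mpr hd))).mpr ?_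
  intro x
  constructor
  · intro hx
    have hxlt : x < 2 * k := List.mem_range.mp hx
    rw [List.mem_append]
    rcases Nat.even_or_odd x with ⟨q, hq⟩ | ⟨q, hq⟩
    · exact Or.inl (List.mem_map.mpr ⟨q, List.mem_range.mpr (by omega), by omega⟩)
    · exact Or.inr (List.mem_map.mpr ⟨q, List.mem_range.mpr (by omega), by omega⟩)
  · intro hx
    rcases List.mem_append.mp hx with h | h
    · rcases List.mem_map.mp h with ⟨q, hq, rfl⟩
      exact List.mem_range.mpr (by have := List.mem_range.mp hq; omega)
    · rcases List.mem_map.mp h with ⟨q, hq, rfl⟩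
      exact List.mem_range.mpr (by have := List.mem_range.mp hq; omega)

theorem pvFoldlIf (P : Nat → Bool) (f : Nat → Int) : ∀ (l : List Nat) (init : Int), -1 ≤ init →
    l.foldl (fun acc m => if P m then max acc (f m) else acc) init
      = pvBestOf (fun m => if P m then f m else -1) init l := by
  intro l
  induction l with
  | nil => intro init h; rfl
  | cons x xs ih =>
      intro init h
      simp only [List.foldl_cons, pvBestOf] at *
      by_cases hp : P x = true
      · simp only [hp, if_true]
        exact ih _ (le_trans h (le_max_left _ _))
      · simp only [hp, if_false, Bool.false_eq_true]
        rw [max_eq_left h]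
        exact ih _ h

theorem pvDfs_eq (reqs : List (Int × Int)) : ∀ (count : List Int) (taken : Int), 0 ≤ taken →
    pvDfsB count reqs taken = pvBestOf (pvG count reqs taken) (-1) (List.range (2 ^ reqs.length)) := by
  induction reqs with
  | nil =>
      intro count taken ht
      simp only [pvDfsB, List.length_nil, pow_zero, List.range_one, pvBestOf, List.foldl_cons,
        List.foldl_nil, pvG, pvApply]
      have h0 : (pvPopcount 0 : Int) = 0 := by simp [pvPopcount]
      rw [h0, add_zero]
      split_ifs with h
      · exact (max_eq_right (by omega)).symm
      · simp
  | cons hd rest ih =>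
      obtain ⟨a, b⟩ := hd
      intro count taken ht
      have hK : 2 ^ ((a, b) :: rest).length = 2 * 2 ^ rest.length := by
        rw [List.length_cons, pow_succ, Nat.mul_comm]
      have gEven : ∀ q, pvG count ((a, b) :: rest) taken (2 * q) = pvG count rest taken q := by
        intro q
        have hb : (2 * q) &&& 1 = 0 := by rw [Nat.and_one_is_mod]; omega
        have hs : (2 * q) >>> 1 = q := by rw [Nat.shiftRight_one]; omega
        simp [pvG, pvApply, hb, hs, pvPopcount_even]
      have gOdd : ∀ q, pvG count ((a, b) :: rest) taken (2 * q + 1)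
          = pvG (pvUpd (pvUpd count a (-1)) b 1) rest (taken + 1) q := by
        intro q
        have hb : (2 * q + 1) &&& 1 = 1 := by rw [Nat.and_one_is_mod]; omega
        have hs : (2 * q + 1) >>> 1 = q := by rw [Nat.shiftRight_one]; omega
        simp only [pvG, pvApply, hb, hs, if_true, pvPopcount_odd]
        split_ifs with h
        · push_cast; ring
        · rfl
      rw [hK, pvBestOf_perm _ (pvRangeTwoMulPerm (2 ^ rest.length)), pvBestOf_append,
        pvBestOf_map, pvBestOf_map,
        pvBestOf_congr _ _ _ _ (fun x _ => gEven x),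
        pvBestOf_congr _ _ _ _ (fun x _ => gOdd x),
        ← ih count taken ht]
      have hI : (-1 : Int) ≤ pvDfsB count rest taken := by
        rw [ih count taken ht]; exact pvBestOf_init_le _ _ _
      rw [show pvDfsB count rest taken
            = max (pvDfsB count rest taken) (-1) from (max_eq_left hI).symm,
        pvBestOf_max_init, ← ih _ (taken + 1) (by omega)]
      simp [pvDfsB]

-- ===== VERDICT (by name: the statement is the Claim_ definition above) =====
theorem maximumRequests_spec : Claim_equal_maximumRequests := by
  intro n requests _hdom _hpre
  unfold Spec_maximumRequests maximumRequests maximumRequests_alt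
  have hca : ∀ mask : Nat, pvCountA (List.replicate n.toNat 0) requests mask 0
      = pvApply (List.replicate n.toNat 0) requests mask := by
    intro mask; rw [pvCountA_eq, Nat.shiftRight_zero]
  simp only [hca]
  rw [pvFoldlIf (fun mask => (pvApply (List.replicate n.toNat 0) requests mask).all (fun x => x == 0))
      (fun mask => (pvPopcount mask : Int)) _ 0 (by omega)]
  rw [pvBestOf_congr _ (pvG (List.replicate n.toNat 0) requests 0) _ _
      (fun m _ => by simp [pvG, zero_add])]
  have key : pvBestOf (pvG (List.replicate n.toNat 0) requests 0) 0 (List.range (2 ^ requests.length))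
      = max 0 (pvBestOf (pvG (List.replicate n.toNat 0) requests 0) (-1) (List.range (2 ^ requests.length))) := by
    have h := pvBestOf_max_init (pvG (List.replicate n.toNat 0) requests 0) (List.range (2 ^ requests.length)) 0 (-1)
    rwa [max_eq_left (by omega : (-1 : Int) ≤ 0)] at h
  rw [key, ← pvDfs_eq requests (List.replicate n.toNat 0) 0 le_rfl]
  refine max_eq_right ?_
  rw [pvDfs_eq requests (List.replicate n.toNat 0) 0 le_rfl]
  have h0mem : (0 : Nat) ∈ List.range (2 ^ requests.length) :=
    List.mem_range.mpr (Nat.pow_pos (by omega))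
  have hle := pvBestOf_le_of_mem (pvG (List.replicate n.toNat 0) requests 0)
      (List.range (2 ^ requests.length)) (-1) 0 h0mem
  have hg0 : pvG (List.replicate n.toNat 0) requests 0 0 = 0 := by
    simp [pvG, pvApply_zero, pvPopcount]
  omega
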